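-- pv_equiv track=rewrite | github.com/mythdorm/relations_classifications | relations.py | make_reflexive
-- ===== SOURCE A (Python) =====
-- def check_reflexive(matrix):
--     reflexive = True
--
--     for row in range(len(matrix)):
--         # row_pos = matrix.index(row)
--         for col in range(len(matrix)):
--             # col_pos = row.index(col)
--             if row == col and not matrix[row][col] == 1:
--                 reflexive = False
--
--
--     return reflexive
--
-- def make_reflexive(matrix):
--     missing_values = []
--     if not check_reflexive(matrix):
--         for row in range(len(matrix)):
--             for col in range(len(matrix)):
--                 if row == col and not matrix[row][col] == 1:
--                     missing_values.append([row, col])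
--
--     matrix_copy = matrix
--     for missing in missing_values:
--         matrix_copy[missing[0]][missing[1]] = 1
--
--     return matrix_copy
-- ===== SOURCE B (Python) =====
-- def make_reflexive(matrix):
--     for i, row in enumerate(matrix):
--         row[i] = 1
--     return matrix
-- ===== Notes on version B (the rewrite author's own statement) =====
-- stated objective: faster
-- what changed: B touches only the n diagonal cells in one enumerate pass instead of A's double n*n index scans (check pass, collect pass) plus an update pass.
import Mathlib
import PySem

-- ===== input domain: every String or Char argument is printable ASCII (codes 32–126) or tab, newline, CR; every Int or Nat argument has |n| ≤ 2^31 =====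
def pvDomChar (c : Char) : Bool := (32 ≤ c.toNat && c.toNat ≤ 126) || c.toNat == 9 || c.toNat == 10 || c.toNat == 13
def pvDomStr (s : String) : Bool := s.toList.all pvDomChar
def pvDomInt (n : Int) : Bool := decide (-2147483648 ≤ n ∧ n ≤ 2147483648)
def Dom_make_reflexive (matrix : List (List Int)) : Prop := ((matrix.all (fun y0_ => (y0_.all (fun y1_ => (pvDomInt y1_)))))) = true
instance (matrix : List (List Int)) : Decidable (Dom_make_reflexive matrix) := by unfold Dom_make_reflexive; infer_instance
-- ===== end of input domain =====

-- B sets the n diagonal cells in one enumerate pass instead of A's two full n*n index scans plus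
-- an update pass; equivalence is about the RETURN value only (both Pythons mutate the rows in
-- place, reaching the same final state).

-- ===== PORT A =====
-- matrix[row][col] (in range whenever A evaluates it on an input admitted by Pre_)
def pyAt (m : List (List Int)) (r c : Nat) : Int := (m.getD r []).getD c 0

def check_reflexive (matrix : List (List Int)) : Bool :=
  (List.range matrix.length).foldl
    (fun refl row =>
      (List.range matrix.length).foldl
        (fun refl col =>
          if row == col && !(pyAt matrix row col == 1) then false else refl)
        refl)
    true

-- the loop that fills missing_values (Python's 2-element list [row, col] ported as a pair)
def missingOf (matrix : List (List Int)) : List (Nat × Nat) :=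
  (List.range matrix.length).foldl
    (fun acc row =>
      (List.range matrix.length).foldl
        (fun acc col =>
          if row == col && !(pyAt matrix row col == 1) then acc ++ [(row, col)] else acc)
        acc)
    []

def make_reflexive (matrix : List (List Int)) : List (List Int) :=
  let missing := if !check_reflexive matrix then missingOf matrix else []
  missing.foldl (fun m p => m.set p.1 ((m.getD p.1 []).set p.2 1)) matrix

-- ===== PORT B =====
-- one pass over the rows, carrying the enumerate index
def altGo (i : Nat) : List (List Int) → List (List Int)
  | [] => []
  | r :: rs => r.set i 1 :: altGo (i + 1) rs

def make_reflexive_alt (matrix : List (List Int)) : List (List Int) :=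
  altGo 0 matrix

-- ===== PRECONDITION & SPEC =====
-- Pre_ excludes exactly the inputs on which A raises IndexError: some row i shorter than i+1,
-- so the diagonal access matrix[i][i] fails.
def Pre_make_reflexive (matrix : List (List Int)) : Prop :=
  ∀ i ∈ List.range matrix.length, i < (matrix.getD i []).length
instance (matrix : List (List Int)) : Decidable (Pre_make_reflexive matrix) := by
  unfold Pre_make_reflexive; infer_instance

def pvWitness_make_reflexive : List (List Int) := [[0, 2], [3, 5]]

def Spec_make_reflexive (matrix : List (List Int)) (out : List (List Int)) : Prop := out = make_reflexive_alt matrix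
instance (matrix : List (List Int)) (out : List (List Int)) : Decidable (Spec_make_reflexive matrix out) := by unfold Spec_make_reflexive; infer_instance

-- ===== CLAIM (what is proved, stated in full; the proofs are below) =====
def Claim_equal_make_reflexive : Prop := ∀ (matrix : List (List Int)), Dom_make_reflexive matrix → Pre_make_reflexive matrix → Spec_make_reflexive matrix (make_reflexive matrix)

-- ===== LEMMAS AND PROOFS =====

def diagBad (matrix : List (List Int)) (row : Nat) : Bool := !(pyAt matrix row row == 1)

-- the inner check loop can only flip the accumulator to false
theorem foldl_if_false (p : Nat → Bool) (l : List Nat) (b : Bool) :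
    l.foldl (fun acc c => if p c then false else acc) b = (b && !(l.any p)) := by
  induction l generalizing b with
  | nil => simp
  | cons h t ih =>
    simp only [List.foldl_cons, List.any_cons, ih]
    by_cases hp : p h <;> simp [hp]

theorem any_range_eq (n row : Nat) (q : Nat → Bool) :
    (List.range n).any (fun c => (row == c) && q c) = (decide (row < n) && q row) := by
  induction n with
  | zero => simp
  | succ n ih =>
    rw [List.range_succ, List.any_append, ih]
    by_cases h2 : row = n
    · subst h2
      by_cases h3 : q row <;> simp [h3]
    · have hne : (row == n) = false := by simp [h2]
      by_cases h1 : row < n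
      · have : row < n + 1 := by omega
        simp [hne, h1, this]
      · have : ¬ row < n + 1 := by omega
        simp [hne, h1, this]

theorem check_char (matrix : List (List Int)) :
    check_reflexive matrix
      = (List.range matrix.length).all (fun row => !(diagBad matrix row)) := by
  unfold check_reflexive
  have houter : ∀ (l : List Nat) (b : Bool),
      l.foldl (fun refl row =>
          (List.range matrix.length).foldl
            (fun refl col =>
              if row == col && !(pyAt matrix row col == 1) then false else refl) refl) b
        = (b && l.all (fun row =>
            !((List.range matrix.length).any
                (fun c => (row == c) && !(pyAt matrix row c == 1))))) := by
    intro l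
    induction l with
    | nil => simp
    | cons h t ih =>
      intro b
      rw [List.foldl_cons, ih, foldl_if_false]
      simp [Bool.and_assoc]
  rw [houter]
  simp only [Bool.true_and]
  rw [Bool.eq_iff_iff, List.all_eq_true, List.all_eq_true]
  constructor
  · intro h r hr
    have hh := h r hr
    rw [any_range_eq] at hh
    simpa [diagBad, List.mem_range.mp hr] using hh
  · intro h r hr
    have hh := h r hr
    rw [any_range_eq]
    simpa [diagBad, List.mem_range.mp hr] using hh

theorem filter_range_eq (matrix : List (List Int)) (n row : Nat) :
    ((List.range n).filter (fun c => (row == c) && !(pyAt matrix row c == 1))).map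
        (fun c => (row, c))
      = if (decide (row < n) && diagBad matrix row) = true then [(row, row)] else [] := by
  induction n with
  | zero => simp
  | succ n ih =>
    rw [List.range_succ, List.filter_append, List.map_append, ih]
    by_cases h2 : row = n
    · subst h2
      have hlt : ¬ row < row := by omega
      have hlt1 : row < row + 1 := by omega
      by_cases h3 : diagBad matrix row
      · have h3' : (!(pyAt matrix row row == 1)) = true := h3
        simp [hlt1, h3', diagBad]
      · have h3' : (!(pyAt matrix row row == 1)) = false := by
          simpa [diagBad] using h3
        simp [hlt1, diagBad, h3']
    · have hne : (row == n) = false := by simp [h2]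
      by_cases h1 : row < n
      · have : row < n + 1 := by omega
        simp [hne, h1, this]
      · have : ¬ row < n + 1 := by omega
        simp [hne, h1, this]

theorem missing_char (matrix : List (List Int)) :
    missingOf matrix
      = ((List.range matrix.length).filter (diagBad matrix)).map (fun r => (r, r)) := by
  unfold missingOf
  have houter : ∀ (l : List Nat) (acc : List (Nat × Nat)), (∀ r ∈ l, r < matrix.length) →
      l.foldl (fun acc row =>
          (List.range matrix.length).foldl
            (fun acc col =>
              if row == col && !(pyAt matrix row col == 1) then acc ++ [(row, col)] else acc)
            acc) acc
        = acc ++ (l.filter (diagBad matrix)).map (fun r => (r, r)) := by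
    intro l
    induction l with
    | nil => simp
    | cons h t ih =>
      intro acc hmem
      have hinner := PySem.List.foldl_append_if
        (fun col => h == col && !(pyAt matrix h col == 1))
        (fun col => (h, col)) (l := List.range matrix.length) (acc := acc)
      simp only [List.foldl_cons]
      rw [hinner, filter_range_eq matrix, ih _ (fun r hr => hmem r (List.mem_cons_of_mem _ hr))]
      have hh : h < matrix.length := hmem h List.mem_cons_self
      by_cases hb : diagBad matrix h <;> simp [hh, hb]
  rw [houter _ _ (fun r hr => List.mem_range.mp hr)]
  simp

-- applying a nodup list of diagonal updates, observed through getElem?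
theorem foldl_upd_getElem (L : List Nat) (hL : L.Nodup) (m0 : List (List Int)) (j : Nat) :
    ((L.map (fun r => (r, r))).foldl
        (fun m p => m.set p.1 ((m.getD p.1 []).set p.2 1)) m0)[j]?
      = if j ∈ L then (m0[j]?).map (fun row => row.set j 1) else m0[j]? := by
  induction L generalizing m0 with
  | nil => simp
  | cons r t ih =>
    simp only [List.map_cons, List.foldl_cons]
    have hnd := hL
    rw [List.nodup_cons] at hnd
    rw [ih hnd.2]
    have hupd : ∀ k, k ≠ r →
        (m0.set r ((m0.getD r []).set r 1))[k]? = m0[k]? := fun k hk =>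
      List.getElem?_set_ne (by omega)
    have hlenupd : (m0.set r ((m0.getD r []).set r 1)).length = m0.length := by
      simp
    by_cases hjt : j ∈ t
    · have hjr : j ≠ r := fun h => hnd.1 (h ▸ hjt)
      rw [if_pos hjt, if_pos (List.mem_cons_of_mem _ hjt), hupd j hjr]
    · rw [if_neg hjt]
      by_cases hjr : j = r
      · subst hjr
        rw [if_pos List.mem_cons_self]
        by_cases hlen : j < m0.length
        · have h3 : m0[j]? = some m0[j] := List.getElem?_eq_getElem hlen
          have h2 : m0.getD j [] = m0[j] := by
            rw [List.getD_eq_getElem?_getD, h3]; rfl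
          rw [h2, List.getElem?_set_self', h3]
          rfl
        · have h0 : m0[j]? = none := List.getElem?_eq_none (by omega)
          rw [List.getElem?_set_self', h0]
          rfl
      · rw [if_neg (by simp [hjt, hjr]), hupd j hjr]

theorem altGo_getElem (m : List (List Int)) (k j : Nat) :
    (altGo k m)[j]? = (m[j]?).map (fun r => r.set (k + j) 1) := by
  induction m generalizing k j with
  | nil => simp [altGo]
  | cons r rs ih =>
    cases j with
    | zero => simp [altGo]
    | succ j =>
      simp only [altGo, List.getElem?_cons_succ]
      rw [ih (k + 1) j, show k + 1 + j = k + (j + 1) from by omega]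

theorem set_eq_self_of_getElem? {xs : List Int} {i : Nat} {a : Int}
    (h : xs[i]? = some a) : xs.set i a = xs := by
  induction xs generalizing i with
  | nil => simp at h
  | cons x t ih =>
    cases i with
    | zero => simp at h; simp [h]
    | succ i => simp at h ⊢; exact ih h

-- ===== VERDICT (by name: the statement is the Claim_ definition above) =====
theorem make_reflexive_spec : Claim_equal_make_reflexive := by
  intro matrix _ hpre
  unfold Spec_make_reflexive make_reflexive make_reflexive_alt
  have hmiss : (if !check_reflexive matrix then missingOf matrix else [])
      = ((List.range matrix.length).filter (diagBad matrix)).map (fun r => (r, r)) := by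
    by_cases hc : check_reflexive matrix
    · have hall := check_char matrix
      rw [hc] at hall
      have : (List.range matrix.length).filter (diagBad matrix) = [] := by
        rw [List.filter_eq_nil_iff]
        intro r hr
        have := (List.all_eq_true.mp hall.symm) r hr
        simpa using this
      simp [hc, this]
    · simp [hc, missing_char]
  rw [hmiss]
  refine List.ext_getElem? (fun j => ?_)
  rw [foldl_upd_getElem _ (List.nodup_range.filter _) matrix j, altGo_getElem]
  simp only [Nat.zero_add]
  by_cases hjn : j < matrix.length
  · have hmemr : j ∈ List.range matrix.length := List.mem_range.mpr hjn
    by_cases hbad : diagBad matrix j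
    · simp [List.mem_filter, hmemr, hbad]
    · have hmem : j ∉ (List.range matrix.length).filter (diagBad matrix) := by
        simp [List.mem_filter, hbad]
      have hone : pyAt matrix j j = 1 := by
        simpa [diagBad] using hbad
      have hjlen : j < (matrix.getD j []).length := hpre j hmemr
      have hrow : matrix.getD j [] = matrix[j] := by
        rw [List.getD_eq_getElem?_getD, List.getElem?_eq_getElem hjn]; rfl
      have hget : (matrix[j])[j]? = some 1 := by
        have h1 : (matrix.getD j []).getD j 0 = 1 := hone
        rw [hrow] at h1 hjlen
        rw [List.getElem?_eq_getElem hjlen]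
        rw [List.getD_eq_getElem?_getD, List.getElem?_eq_getElem hjlen] at h1
        simpa using h1
      have hsetid : (matrix[j]).set j 1 = matrix[j] := set_eq_self_of_getElem? hget
      simp [hmem, List.getElem?_eq_getElem hjn, hsetid]
  · have h0 : matrix[j]? = none := List.getElem?_eq_none (by omega)
    have hmem : j ∉ (List.range matrix.length).filter (diagBad matrix) := by
      simp [List.mem_filter, List.mem_range]
      omega
    simp [hmem, h0]
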